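-- pv_equiv track=rewrite | github.com/Pratham2994/OmniCompiler | server/test/eval_detector.py | bigify
-- ===== SOURCE A (Python) =====
-- def bigify(code: str, target_bytes: int = 20000) -> str:
--     if not code.endswith("\n"):
--         code += "\n"
--     out = []
--     cur = 0
--     while cur < target_bytes:
--         out.append(code)
--         cur += len(code.encode("utf-8", "ignore"))
--     return "".join(out)
-- ===== SOURCE B (Python) =====
-- def bigify(code: str, target_bytes: int = 20000) -> str:
--     if not code.endswith("\n"):
--         code += "\n"
--     n = -(-target_bytes // len(code.encode("utf-8", "ignore")))
--     return code * n
-- ===== Notes on version B (the rewrite author's own statement) =====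
-- stated objective: simpler
-- what changed: Replaces the accumulating while-loop that appends copies until the byte count reaches target_bytes with a closed-form ceiling-division repetition count and a single string multiply.
import Mathlib
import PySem

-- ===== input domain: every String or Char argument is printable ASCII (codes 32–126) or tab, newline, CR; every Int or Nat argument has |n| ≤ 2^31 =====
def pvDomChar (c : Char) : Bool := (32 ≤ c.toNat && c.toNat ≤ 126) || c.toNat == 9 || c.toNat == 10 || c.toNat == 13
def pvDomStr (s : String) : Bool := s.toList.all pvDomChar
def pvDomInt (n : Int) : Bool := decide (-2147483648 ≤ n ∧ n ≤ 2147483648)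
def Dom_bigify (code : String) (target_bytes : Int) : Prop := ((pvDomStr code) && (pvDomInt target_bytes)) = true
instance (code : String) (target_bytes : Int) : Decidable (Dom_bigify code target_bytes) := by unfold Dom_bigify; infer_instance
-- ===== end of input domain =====

-- B replaces A's accumulating while-loop with a closed-form ceiling-division count and one repetition (objective: simpler).


-- ===== PORT A =====
-- the while-loop of A; fuel only makes the recursion total (the loop runs at most target_bytes.toNat times since each step adds b ≥ 1)
def bigifyLoop (code : String) (b tb : Int) (fuel : Nat) (out : List String) (cur : Int) : List String :=
  match fuel with
  | 0 => out
  | Nat.succ f => if cur < tb then bigifyLoop code b tb f (out ++ [code]) (cur + b) else out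

-- the newline fixup at the top of A ('if not code.endswith("\n"): code += "\n"')
def bigifyFix (code : String) : String :=
  if PySem.Str.endswith code "\n" then code else String.ofList (code.toList ++ ['\n'])

-- len(code.encode("utf-8","ignore")) is ported as the character count PySem.Str.len: exact on the ASCII domain Dom_bigify
def bigify (code : String) (target_bytes : Int) : String :=
  PySem.Str.join "" (bigifyLoop (bigifyFix code) (PySem.Str.len (bigifyFix code)) target_bytes target_bytes.toNat [] 0)

-- ===== PORT B =====
-- the same newline fixup, at the top of B
def bigifyFixAlt (code : String) : String :=
  if PySem.Str.endswith code "\n" then code else String.ofList (code.toList ++ ['\n'])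

-- n = -(-target_bytes // b) (ceiling division); code * n is the n-fold repetition (empty for n ≤ 0)
def bigify_alt (code : String) (target_bytes : Int) : String :=
  PySem.Str.join "" (List.replicate (-(PySem.Int.floordiv (-target_bytes) (PySem.Str.len (bigifyFixAlt code)))).toNat (bigifyFixAlt code))

-- ===== PRECONDITION & SPEC =====
def Spec_bigify (code : String) (target_bytes : Int) (out : String) : Prop := out = bigify_alt code target_bytes
instance (code : String) (target_bytes : Int) (out : String) : Decidable (Spec_bigify code target_bytes out) := by unfold Spec_bigify; infer_instance

-- ===== CLAIM (what is proved, stated in full; the proofs are below) =====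
def Claim_equal_bigify : Prop := ∀ (code : String) (target_bytes : Int), Dom_bigify code target_bytes → Spec_bigify code target_bytes (bigify code target_bytes)

-- ===== LEMMAS AND PROOFS =====

-- A's loop, run with enough fuel, produces exactly n appended copies, where n is the least
-- count with cur + n*b ≥ tb (characterised by the two inequalities h1/h2).
theorem bigifyLoop_eq (code : String) (b tb : Int) (hb : 0 < b) :
    ∀ (n : Nat) (fuel : Nat) (cur : Int) (out : List String), n ≤ fuel →
      tb ≤ cur + n * b → (n = 0 ∨ cur + (n - 1 : Nat) * b < tb) →
      bigifyLoop code b tb fuel out cur = out ++ List.replicate n code := by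
  intro n
  induction n with
  | zero =>
    intro fuel cur out _ h1 _
    cases fuel with
    | zero => simp [bigifyLoop]
    | succ f =>
      simp only [Nat.cast_zero, zero_mul, add_zero] at h1
      simp [bigifyLoop, not_lt.mpr h1]
  | succ n ih =>
    intro fuel cur out hfuel h1 h2
    have hnb : (0:Int) ≤ n * b := by positivity
    have hcur : cur < tb := by
      rcases h2 with h | h
      · omega
      · simp only [Nat.add_sub_cancel] at h
        omega
    cases fuel with
    | zero => omega
    | succ f =>
      simp only [bigifyLoop, if_pos hcur]
      rw [ih f (cur + b) (out ++ [code]) (by omega)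
        (by push_cast at h1 ⊢; linarith)
        (by
          cases n with
          | zero => exact Or.inl rfl
          | succ m =>
            right
            simp only [Nat.add_sub_cancel] at h2 ⊢
            rcases h2 with h | h
            · omega
            · push_cast at h ⊢; linarith)]
      simp [List.replicate_succ]

-- the ceiling count q = -((-tb) // b) satisfies the characterisation used above
theorem ceil_bounds (tb b : Int) (hb : 0 < b) :
    (-(PySem.Int.floordiv (-tb) b) - 1) * b < tb ∧ tb ≤ -(PySem.Int.floordiv (-tb) b) * b := by
  have h := (PySem.Int.neg_floordiv_neg_eq_iff_of_pos (a := tb) (b := b)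
    (q := -(PySem.Int.floordiv (-tb) b)) hb).mp rfl
  exact h

theorem endswith_code_ne_nil (code : String) : (bigifyFix code).toList ≠ [] := by
  unfold bigifyFix
  split
  · rename_i h
    have := (PySem.Chars.endswith_iff (s := code.toList) (p := "\n".toList)).mp (by
      simpa [PySem.Str.endswith] using h)
    intro hnil
    rw [hnil] at this
    simp at this
  · rw [String.toList_ofList]
    simp

-- ===== VERDICT (by name: the statement is the Claim_ definition above) =====
theorem bigify_spec : Claim_equal_bigify := by
  intro code tb _
  unfold Spec_bigify bigify bigify_alt
  have hfix : bigifyFixAlt code = bigifyFix code := rfl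
  rw [hfix]
  set code' := bigifyFix code with hc
  have hne := endswith_code_ne_nil code
  rw [← hc] at hne
  set b : Int := PySem.Str.len code' with hbdef
  have hb : 0 < b := by
    rw [hbdef, PySem.Str.len_eq]
    have : 0 < code'.toList.length := List.length_pos_iff.mpr hne
    exact_mod_cast this
  obtain ⟨hlo, hhi⟩ := ceil_bounds tb b hb
  set q : Int := -(PySem.Int.floordiv (-tb) b) with hq
  congr 1
  by_cases hq0 : q ≤ 0
  · -- q ≤ 0: zero copies; tb ≤ q*b ≤ 0
    have hqb : q * b ≤ 0 := mul_nonpos_of_nonpos_of_nonneg hq0 (le_of_lt hb)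
    have hqn : q.toNat = 0 := Int.toNat_of_nonpos hq0
    rw [hqn]
    exact bigifyLoop_eq code' b tb hb 0 tb.toNat 0 [] (by omega) (by simpa using le_trans hhi hqb) (Or.inl rfl)
  · -- q ≥ 1: exactly q copies
    have hq0' : 0 < q := by omega
    have hqn : (q.toNat : Int) = q := Int.toNat_of_nonneg (le_of_lt hq0')
    have hfuel : q.toNat ≤ tb.toNat := by
      have h1 : q - 1 ≤ (q - 1) * b := le_mul_of_one_le_right (by omega) hb
      omega
    refine bigifyLoop_eq code' b tb hb q.toNat tb.toNat 0 [] hfuel (by rw [hqn]; omega) ?_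
    right
    have : ((q.toNat - 1 : Nat) : Int) = q - 1 := by omega
    rw [this]
    omega
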